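-- pv_equiv track=rewrite | github.com/ts207/solo | project/portfolio/thesis_overlap.py | _sorted_tokens
-- ===== SOURCE A (Python) =====
-- from typing import Any, Iterable
--
-- def _sorted_tokens(values: Iterable[Any]) -> list[str]:
--     out: list[str] = []
--     seen: set[str] = set()
--     for value in values:
--         token = str(value or "").strip().upper()
--         if token and token not in seen:
--             out.append(token)
--             seen.add(token)
--     return sorted(out)
-- ===== SOURCE B (Python) =====
-- from typing import Any, Iterable
--
-- def _sorted_tokens(values: Iterable[Any]) -> list[str]:
--     toks: list[str] = []
--     for value in values:
--         t = str(value or "").strip().upper()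
--         if t:
--             toks.append(t)
--     toks.sort()
--     out: list[str] = []
--     for t in toks:
--         if not out or out[-1] != t:
--             out.append(t)
--     return out
-- ===== Notes on version B (the rewrite author's own statement) =====
-- stated objective: idiomatic
-- what changed: Collects all normalized tokens (with duplicates), sorts once, and deduplicates by comparing each element with the previously emitted one in the sorted order, instead of maintaining a hash 'seen' set and an insertion-order list and then sorting the unique list.
import Mathlib
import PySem

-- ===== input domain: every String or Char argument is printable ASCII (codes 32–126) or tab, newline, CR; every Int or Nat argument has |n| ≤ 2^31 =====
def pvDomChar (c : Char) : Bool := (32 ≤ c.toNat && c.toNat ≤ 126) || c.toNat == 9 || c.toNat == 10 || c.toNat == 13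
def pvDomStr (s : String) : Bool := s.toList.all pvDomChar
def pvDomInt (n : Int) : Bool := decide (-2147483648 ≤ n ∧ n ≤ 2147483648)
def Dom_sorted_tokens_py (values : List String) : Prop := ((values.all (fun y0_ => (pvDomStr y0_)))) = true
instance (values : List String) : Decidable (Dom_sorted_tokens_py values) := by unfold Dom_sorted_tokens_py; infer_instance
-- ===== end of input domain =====

-- B sorts the full normalized token list once and deduplicates by sort-adjacency instead of
-- maintaining a 'seen' set plus an insertion-order list; same cost, more idiomatic.

-- ===== PORT A =====
def sorted_tokens_py (values : List String) : List String :=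
  let st := values.foldl
    (fun (acc : List String × PySem.Set String) value =>
      let token := PySem.Str.upper (PySem.Str.strip (if value = "" then "" else value))
      if token ≠ "" ∧ ¬ PySem.Set.contains acc.2 token then
        (acc.1 ++ [token], PySem.Set.add acc.2 token)
      else acc)
    ([], PySem.Set.empty)
  PySem.List.sorted st.1 (fun x => x) false

-- ===== PORT B =====
def sorted_tokens_py_alt (values : List String) : List String :=
  let toks := values.foldl
    (fun (acc : List String) value =>
      let t := PySem.Str.upper (PySem.Str.strip (if value = "" then "" else value))
      if t ≠ "" then acc ++ [t] else acc)
    []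
  let s := PySem.List.sorted toks (fun x => x) false
  -- out[-1] is only read when out is nonempty, so it is List.getLast? here (exact)
  s.foldl (fun (out : List String) t =>
      if out = [] ∨ out.getLast? ≠ some t then out ++ [t] else out)
    []

-- ===== PRECONDITION & SPEC =====
def Spec_sorted_tokens_py (values : List String) (out : List String) : Prop := out = sorted_tokens_py_alt values
instance (values : List String) (out : List String) : Decidable (Spec_sorted_tokens_py values out) := by unfold Spec_sorted_tokens_py; infer_instance

-- ===== CLAIM (what is proved, stated in full; the proofs are below) =====
def Claim_equal_sorted_tokens_py : Prop := ∀ (values : List String), Dom_sorted_tokens_py values → Spec_sorted_tokens_py values (sorted_tokens_py values)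

-- ===== LEMMAS AND PROOFS =====

-- the shared normalization both loops apply to each value
def pvNorm (v : String) : String :=
  PySem.Str.upper (PySem.Str.strip (if v = "" then "" else v))

-- A's paired loop keeps out = seen (as lists): from (s, s) it computes Set.update s of the
-- normalized non-empty tokens, in both components
theorem pvA_loop (values : List String) (s : PySem.Set String) :
    values.foldl
      (fun (acc : List String × PySem.Set String) value =>
        let token := PySem.Str.upper (PySem.Str.strip (if value = "" then "" else value))
        if token ≠ "" ∧ ¬ PySem.Set.contains acc.2 token then
          (acc.1 ++ [token], PySem.Set.add acc.2 token)
        else acc)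
      (s, s)
    = (PySem.Set.update s ((values.filter (fun v => pvNorm v ≠ "")).map pvNorm),
       PySem.Set.update s ((values.filter (fun v => pvNorm v ≠ "")).map pvNorm)) := by
  induction values generalizing s with
  | nil => simp [PySem.Set.update]
  | cons v rest ih =>
    rw [List.foldl_cons]
    have hstep : (let token := PySem.Str.upper (PySem.Str.strip (if v = "" then "" else v))
          if token ≠ "" ∧ ¬ PySem.Set.contains (s, s).2 token then
            ((s, s).1 ++ [token], PySem.Set.add (s, s).2 token)
          else (s, s))
        = if pvNorm v = "" then ((s : List String), s)
          else (PySem.Set.add s (pvNorm v), PySem.Set.add s (pvNorm v)) := by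
      show (if pvNorm v ≠ "" ∧ ¬ PySem.Set.contains s (pvNorm v) then
              (s ++ [pvNorm v], PySem.Set.add s (pvNorm v))
            else (s, s)) = _
      by_cases ht : pvNorm v = ""
      · rw [if_neg (by simp [ht]), if_pos ht]
      · rw [if_neg ht]
        by_cases hc : PySem.Set.contains s (pvNorm v)
        · rw [if_neg (fun h => h.2 hc)]
          have : PySem.Set.add s (pvNorm v) = s := by unfold PySem.Set.add; rw [if_pos hc]
          rw [this]
        · rw [if_pos ⟨ht, hc⟩]
          have : PySem.Set.add s (pvNorm v) = s ++ [pvNorm v] := by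
            unfold PySem.Set.add; rw [if_neg hc]
          rw [this]
    rw [hstep]
    by_cases ht : pvNorm v = ""
    · have hp : (decide (pvNorm v ≠ "")) = false := by simp [ht]
      rw [if_pos ht, List.filter_cons, hp]
      simp only [Bool.false_eq_true, if_false]
      exact ih s
    · have hp : (decide (pvNorm v ≠ "")) = true := by simp [ht]
      rw [if_neg ht, ih (PySem.Set.add s (pvNorm v)), List.filter_cons, hp]
      simp only [if_true]
      rw [List.map_cons, PySem.Set.update_cons]

-- in a Pairwise(<) list every element is ≤ the last
theorem pvLe_getLast {l : List String} (h : l.Pairwise (· < ·)) {a L : String}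
    (ha : a ∈ l) (hL : l.getLast? = some L) : a ≤ L := by
  induction l with
  | nil => simp at ha
  | cons x xs ih =>
    cases xs with
    | nil =>
      simp at ha hL
      simp [ha, hL]
    | cons y ys =>
      rw [List.getLast?_cons_cons] at hL
      rcases List.mem_cons.mp ha with rfl | ha'
      · have hLmem : L ∈ y :: ys := List.mem_of_getLast? hL
        exact le_of_lt ((List.pairwise_cons.mp h).1 L hLmem)
      · exact ih (List.pairwise_cons.mp h).2 ha' hL

-- the adjacency-dedup fold: from a strictly increasing acc whose elements are ≤ everything in s,
-- over a Pairwise(≤) list s, it yields a strictly increasing list whose members are acc's and s's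
theorem pvAdj (s : List String) (acc : List String)
    (hacc : acc.Pairwise (· < ·)) (hs : s.Pairwise (· ≤ ·))
    (hcross : ∀ a ∈ acc, ∀ b ∈ s, a ≤ b) :
    (s.foldl (fun (out : List String) t =>
        if out = [] ∨ out.getLast? ≠ some t then out ++ [t] else out) acc).Pairwise (· < ·)
    ∧ ∀ x, x ∈ s.foldl (fun (out : List String) t =>
        if out = [] ∨ out.getLast? ≠ some t then out ++ [t] else out) acc ↔ x ∈ acc ∨ x ∈ s := by
  induction s generalizing acc with
  | nil => simpa using hacc
  | cons t rest ih =>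
    obtain ⟨hhead, htail⟩ := List.pairwise_cons.mp hs
    simp only [List.foldl_cons]
    by_cases hC : acc = [] ∨ acc.getLast? ≠ some t
    · rw [if_pos hC]
      have hlt : ∀ a ∈ acc, a < t := by
        intro a ha
        rcases lt_or_eq_of_le (hcross a ha t (List.mem_cons_self)) with h | rfl
        · exact h
        exfalso
        have hne : acc ≠ [] := by intro h0; rw [h0] at ha; simp at ha
        rcases hC with h0 | hgl
        · exact hne h0
        obtain ⟨L, hL⟩ : ∃ L, acc.getLast? = some L := by
          cases hq : acc.getLast? with
          | none => exact absurd (List.getLast?_eq_none_iff.mp hq) hne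
          | some L => exact ⟨L, rfl⟩
        have h1 : a ≤ L := pvLe_getLast hacc ha hL
        have h2 : L ≤ a := hcross L (List.mem_of_getLast? hL) a (List.mem_cons_self)
        exact hgl (by rw [hL, le_antisymm h2 h1])
      have hacc' : (acc ++ [t]).Pairwise (· < ·) := by
        apply List.pairwise_append.mpr
        refine ⟨hacc, List.pairwise_singleton _ _, ?_⟩
        intro a ha b hb
        simp only [List.mem_singleton] at hb
        subst hb
        exact hlt a ha
      have hcross' : ∀ a ∈ acc ++ [t], ∀ b ∈ rest, a ≤ b := by
        intro a ha b hb
        rcases List.mem_append.mp ha with h | h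
        · exact hcross a h b (List.mem_cons_of_mem _ hb)
        · simp only [List.mem_singleton] at h; subst h; exact hhead b hb
      obtain ⟨h1, h2⟩ := ih (acc ++ [t]) hacc' htail hcross'
      refine ⟨h1, fun x => ?_⟩
      rw [h2 x]
      simp only [List.mem_append, List.mem_cons]
      tauto
    · rw [if_neg hC]
      push Not at hC
      obtain ⟨hne, hL⟩ := hC
      have ht_mem : t ∈ acc := List.mem_of_getLast? hL
      obtain ⟨h1, h2⟩ := ih acc hacc htail
        (fun a ha b hb => hcross a ha b (List.mem_cons_of_mem _ hb))
      refine ⟨h1, fun x => ?_⟩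
      rw [h2 x]
      constructor
      · rintro (h | h)
        · exact Or.inl h
        · exact Or.inr (List.mem_cons_of_mem _ h)
      · rintro (h | h)
        · exact Or.inl h
        · rcases List.mem_cons.mp h with rfl | h'
          · exact Or.inl ht_mem
          · exact Or.inr h'

-- ===== VERDICT (by name: the statement is the Claim_ definition above) =====
theorem sorted_tokens_py_spec : Claim_equal_sorted_tokens_py := by
  intro values _
  unfold Spec_sorted_tokens_py sorted_tokens_py sorted_tokens_py_alt
  have e1 : values.foldl
      (fun (acc : List String × PySem.Set String) value =>
        let token := PySem.Str.upper (PySem.Str.strip (if value = "" then "" else value))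
        if token ≠ "" ∧ ¬ PySem.Set.contains acc.2 token then
          (acc.1 ++ [token], PySem.Set.add acc.2 token)
        else acc)
      ([], PySem.Set.empty)
    = (PySem.Set.update PySem.Set.empty ((values.filter (fun v => pvNorm v ≠ "")).map pvNorm),
       PySem.Set.update PySem.Set.empty ((values.filter (fun v => pvNorm v ≠ "")).map pvNorm)) :=
    pvA_loop values PySem.Set.empty
  have e2 : values.foldl
      (fun (acc : List String) value =>
        let t := PySem.Str.upper (PySem.Str.strip (if value = "" then "" else value))
        if t ≠ "" then acc ++ [t] else acc)
      []
    = (values.filter (fun v => pvNorm v ≠ "")).map pvNorm := by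
    have h := PySem.List.foldl_append_ite (fun v => pvNorm v ≠ "") pvNorm values []
    simpa [pvNorm] using h
  show PySem.List.sorted
      (values.foldl
        (fun (acc : List String × PySem.Set String) value =>
          let token := PySem.Str.upper (PySem.Str.strip (if value = "" then "" else value))
          if token ≠ "" ∧ ¬ PySem.Set.contains acc.2 token then
            (acc.1 ++ [token], PySem.Set.add acc.2 token)
          else acc)
        ([], PySem.Set.empty)).1 (fun x => x) false
    = (PySem.List.sorted
        (values.foldl
          (fun (acc : List String) value =>
            let t := PySem.Str.upper (PySem.Str.strip (if value = "" then "" else value))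
            if t ≠ "" then acc ++ [t] else acc)
          []) (fun x => x) false).foldl
        (fun (out : List String) t =>
          if out = [] ∨ out.getLast? ≠ some t then out ++ [t] else out) []
  rw [e1, e2]
  set T := (values.filter (fun v => pvNorm v ≠ "")).map pvNorm with hT
  have hupd : PySem.Set.update PySem.Set.empty T = PySem.Set.ofList T := by
    rw [PySem.Set.ofList_eq_foldl]; rfl
  rw [hupd]
  set S := PySem.List.sorted T (fun x => x) false with hSdef
  have hS : S.Pairwise (· ≤ ·) := PySem.List.sorted_pairwise T (fun x => x)
  obtain ⟨h1, h2⟩ := pvAdj S [] (List.Pairwise.nil) hS (by intro a ha; simp at ha)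
  have hnodup : (S.foldl (fun (out : List String) t =>
      if out = [] ∨ out.getLast? ≠ some t then out ++ [t] else out) []).Nodup :=
    h1.imp (fun h => ne_of_lt h)
  have hperm : (S.foldl (fun (out : List String) t =>
      if out = [] ∨ out.getLast? ≠ some t then out ++ [t] else out) []).Perm (PySem.Set.ofList T) := by
    refine (List.perm_ext_iff_of_nodup hnodup (PySem.Set.nodup_ofList T)).mpr ?_
    intro x
    rw [h2 x]
    simp [hSdef, PySem.List.mem_sorted, PySem.Set.mem_ofList]
  exact PySem.List.sorted_eq_of_perm_of_pairwise_lt _ _ _ hperm h1
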